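-- pv_equiv track=rewrite | github.com/KonradMarzec1991/Codewars-LeetCode | Codewars/Python/7kyu/7kyu_Ordered Count of Characters.py | ordered_count
-- ===== SOURCE A (Python) =====
-- def ordered_count(input):
--     d = dict()
--     for letter in input:
--         if not letter in d:
--             d[letter] = 1
--         else:
--             d[letter] += 1
--     return sorted(list(d.items()), key=lambda x: input.index(x[0]))
-- ===== SOURCE B (Python) =====
-- def ordered_count(input):
--     seen = set()
--     result = []
--     for letter in input:
--         if letter not in seen:
--             seen.add(letter)
--             result.append((letter, input.count(letter)))
--     return result
-- ===== Notes on version B (the rewrite author's own statement) =====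
-- stated objective: faster
-- what changed: Single pass with a seen-set that appends (letter, input.count(letter)) at each first occurrence, producing first-occurrence order directly; drops the counting dict and the final sort keyed by input.index.
import Mathlib
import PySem

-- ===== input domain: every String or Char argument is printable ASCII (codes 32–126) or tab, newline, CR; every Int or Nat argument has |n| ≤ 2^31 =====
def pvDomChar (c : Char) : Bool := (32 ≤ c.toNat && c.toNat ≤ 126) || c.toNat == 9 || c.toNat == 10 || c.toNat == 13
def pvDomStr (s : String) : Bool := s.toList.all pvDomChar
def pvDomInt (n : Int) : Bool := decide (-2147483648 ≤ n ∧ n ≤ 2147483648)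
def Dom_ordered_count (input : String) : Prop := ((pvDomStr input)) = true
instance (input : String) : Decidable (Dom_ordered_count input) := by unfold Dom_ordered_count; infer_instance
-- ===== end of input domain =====

-- B replaces A's count-dict plus a sort keyed by input.index with one pass that appends
-- (letter, input.count(letter)) at each first occurrence; measured faster (no sort, no index rescans).

-- ===== PORT A =====
-- dict keyed by the 1-char strings of input, modelled with Char keys; the final map
-- restores the String pairs. 'd[letter] += 1' is insert letter (d.getD letter 0 + 1);
-- 'input.index(x[0])' is PySem.Str.find (exact here: x[0] always occurs in input).
def ordered_count (input : String) : List (String × Int) :=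
  (PySem.List.sorted
      (input.toList.foldl
        (fun d c => if ¬ (d.contains c = true) then d.insert c 1 else d.insert c (d.getD c 0 + 1))
        PySem.Dict.empty).items
      (fun x => PySem.Str.find input (String.singleton x.1)) false).map
    (fun p => (String.singleton p.1, p.2))

-- ===== PORT B =====
def ordered_count_alt (input : String) : List (String × Int) :=
  (input.toList.foldl
    (fun (st : PySem.Set Char × List (String × Int)) c =>
      if ¬ (PySem.Set.contains st.1 c = true) then
        (PySem.Set.add st.1 c,
         st.2 ++ [(String.singleton c, (PySem.Str.count input (String.singleton c) : Int))])
      else st)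
    (PySem.Set.empty, [])).2

-- ===== PRECONDITION & SPEC =====
def Spec_ordered_count (input : String) (out : List (String × Int)) : Prop := out = ordered_count_alt input
instance (input : String) (out : List (String × Int)) : Decidable (Spec_ordered_count input out) := by unfold Spec_ordered_count; infer_instance

-- ===== CLAIM (what is proved, stated in full; the proofs are below) =====
def Claim_equal_ordered_count : Prop := ∀ (input : String), Dom_ordered_count input → Spec_ordered_count input (ordered_count input)

-- ===== LEMMAS AND PROOFS =====

-- str.count of a 1-char needle is the element count
theorem pv_count_go_singleton (c : Char) : ∀ (fuel : Nat) (l : List Char) (acc : Nat), l.length ≤ fuel →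
    PySem.Chars.count.go [c] fuel l acc = acc + l.count c := by
  intro fuel
  induction fuel with
  | zero => intro l acc h; simp at h; simp [h, PySem.Chars.count.go]
  | succ n ih =>
    intro l acc h
    match l with
    | [] => simp [PySem.Chars.count.go]
    | x :: t =>
      simp only [PySem.Chars.count.go]
      by_cases hx : x = c
      · subst hx
        simp [List.isPrefixOf]
        rw [ih t (acc+1) (by simpa using Nat.lt_succ_iff.mp (by simpa using h))]
        omega
      · have : [c].isPrefixOf (x :: t) = false := by
          simp [List.isPrefixOf]; exact fun hh => hx (by simpa [eq_comm] using hh)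
        simp [this, hx]
        exact ih t acc (by simpa using Nat.lt_succ_iff.mp (by simpa using h))

theorem pv_count_singleton (L : List Char) (c : Char) : PySem.Chars.count L [c] = L.count c := by
  unfold PySem.Chars.count
  simp [pv_count_go_singleton c L.length L 0 le_rfl]

theorem pv_singleton_prefix (c : Char) (t : List Char) : [c] <+: t ↔ t.head? = some c := by
  constructor
  · rintro ⟨r, rfl⟩; rfl
  · intro h; cases t with
    | nil => simp at h
    | cons x r => simp at h; subst h; exact ⟨r, rfl⟩

-- str.find of a 1-char needle that occurs is the first index of that char
theorem pv_find_singleton (L : List Char) (c : Char) (hc : c ∈ L) :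
    PySem.Chars.find L [c] = (L.idxOf c : Int) := by
  have hnn : 0 ≤ PySem.Chars.find L [c] := by
    rw [PySem.Chars.find_nonneg_iff]
    exact (List.singleton_infix_iff c L).mpr hc
  obtain ⟨hpre, hmin⟩ := PySem.Chars.find_spec (s := L) (sub := [c]) hnn
  set n := (PySem.Chars.find L [c]).toNat with hn
  have hlen : n < L.length := by
    by_contra h
    rw [List.drop_eq_nil_of_le (by omega)] at hpre
    simp at hpre
  have hget : L[n]? = some c := by
    have := (pv_singleton_prefix c _).mp hpre
    rwa [List.head?_drop] at this
  -- idxOf ≤ n : c occurs in take (n+1)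
  have hget' : L[n] = c := by
    rwa [List.getElem?_eq_getElem hlen, Option.some_inj] at hget
  have hmem : c ∈ L.take (n + 1) := by
    have hn1 : n < (L.take (n + 1)).length := by simp; omega
    have : (L.take (n + 1))[n]'hn1 = c := by
      rw [List.getElem_take]; exact hget'
    exact this ▸ List.getElem_mem hn1
  have hle : L.idxOf c ≤ n := by
    have h1 : L.idxOf c = (L.take (n + 1)).idxOf c :=
      ((L.take_prefix (n + 1)).idxOf_eq_of_mem hmem).symm
    have h2 : (L.take (n + 1)).idxOf c < (L.take (n + 1)).length :=
      List.idxOf_lt_length_of_mem hmem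
    simp only [List.length_take] at h2
    omega
  -- n ≤ idxOf : minimality of find
  have hge : n ≤ L.idxOf c := by
    by_contra h
    push Not at h
    apply hmin (L.idxOf c) h
    rw [pv_singleton_prefix, List.head?_drop]
    rw [List.getElem?_eq_getElem (List.idxOf_lt_length_of_mem hc)]
    exact congrArg some (List.getElem_idxOf _)
  omega

-- the distinct elements in first-occurrence order have strictly increasing first indices
theorem pv_ofList_pairwise (L : List Char) :
    (PySem.Set.ofList L).Pairwise (fun a b => L.idxOf a < L.idxOf b) := by
  induction L using List.reverseRecOn with
  | nil => simp [PySem.Set.ofList]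
  | append_singleton xs c ih =>
    have hof : PySem.Set.ofList (xs ++ [c]) = PySem.Set.add (PySem.Set.ofList xs) c := by
      rw [PySem.Set.ofList_eq_foldl, PySem.Set.ofList_eq_foldl, List.foldl_append]; rfl
    rw [hof]
    by_cases hc : c ∈ PySem.Set.ofList xs
    · rw [PySem.Set.add_of_mem hc]
      refine ih.imp_of_mem ?_
      intro a b ha hb hab
      have ha' : a ∈ xs := (PySem.Set.mem_ofList _ _).mp ha
      have hb' : b ∈ xs := (PySem.Set.mem_ofList _ _).mp hb
      rwa [List.idxOf_append_of_mem ha', List.idxOf_append_of_mem hb']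
    · rw [PySem.Set.add_of_not_mem hc]
      rw [List.pairwise_append]
      refine ⟨ih.imp_of_mem ?_, List.pairwise_singleton _ _, ?_⟩
      · intro a b ha hb hab
        have ha' : a ∈ xs := (PySem.Set.mem_ofList _ _).mp ha
        have hb' : b ∈ xs := (PySem.Set.mem_ofList _ _).mp hb
        rwa [List.idxOf_append_of_mem ha', List.idxOf_append_of_mem hb']
      · intro a ha b hb
        have ha' : a ∈ xs := (PySem.Set.mem_ofList _ _).mp ha
        have hcx : c ∉ xs := fun h => hc ((PySem.Set.mem_ofList _ _).mpr h)
        simp only [List.mem_singleton] at hb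
        subst hb
        rw [List.idxOf_append_of_mem ha', List.idxOf_append_of_notMem hcx]
        have := List.idxOf_lt_length_of_mem ha'
        simp
        omega

-- A's dict loop is Counter(input)
theorem pv_dict_eq_counter (L : List Char) :
    L.foldl (fun d c => if ¬ (d.contains c = true) then d.insert c 1
                        else d.insert c (d.getD c 0 + 1)) PySem.Dict.empty
      = PySem.Dict.counter L := by
  have hpt : ∀ (d : PySem.Dict Char Int) (c : Char), c ∈ L →
      (if ¬ (d.contains c = true) then d.insert c 1 else d.insert c (d.getD c 0 + 1))
        = d.insert c (d.getD c 0 + 1) := by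
    intro d c _
    by_cases h : d.contains c = true
    · simp [h]
    · have h0 : d.getD c 0 = 0 := by
        apply PySem.Dict.getD_of_not_contains
        simpa using h
      rw [if_pos (by simp [h]), h0]
      norm_num
  exact (PySem.List.foldl_congr_mem _ _ _ _ hpt).trans
    (PySem.Dict.foldl_insert_getD_add_one_eq_counter L)

-- B's loop, run over any list, collects first occurrences with the global counts
theorem pv_foldB (input : String) (t : List Char) :
    t.foldl (fun (st : PySem.Set Char × List (String × Int)) c =>
        if ¬ (PySem.Set.contains st.1 c = true) then
          (PySem.Set.add st.1 c,
           st.2 ++ [(String.singleton c, (PySem.Str.count input (String.singleton c) : Int))])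
        else st)
      (PySem.Set.empty, [])
    = (PySem.Set.ofList t,
       (PySem.Set.ofList t).map
         (fun c => (String.singleton c, (PySem.Str.count input (String.singleton c) : Int)))) := by
  induction t using List.reverseRecOn with
  | nil => simp [PySem.Set.ofList, PySem.Set.empty]
  | append_singleton xs c ih =>
    rw [List.foldl_append, ih]
    have hof : PySem.Set.ofList (xs ++ [c]) = PySem.Set.add (PySem.Set.ofList xs) c := by
      rw [PySem.Set.ofList_eq_foldl, PySem.Set.ofList_eq_foldl, List.foldl_append]; rfl
    by_cases hc : c ∈ PySem.Set.ofList xs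
    · have : PySem.Set.contains (PySem.Set.ofList xs) c = true := (PySem.Set.contains_iff _ _).mpr hc
      simp only [List.foldl_cons, List.foldl_nil, this, not_true_eq_false, if_neg, hof,
        PySem.Set.add_of_mem hc, not_false_eq_true]
    · have : ¬ (PySem.Set.contains (PySem.Set.ofList xs) c = true) := fun h => hc ((PySem.Set.contains_iff _ _).mp h)
      simp only [List.foldl_cons, List.foldl_nil, this, hof,
        PySem.Set.add_of_not_mem hc]
      simp

-- ===== VERDICT (by name: the statement is the Claim_ definition above) =====
theorem ordered_count_spec : Claim_equal_ordered_count := by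
  intro input _
  unfold Spec_ordered_count ordered_count ordered_count_alt
  rw [pv_foldB]
  rw [pv_dict_eq_counter]
  rw [PySem.Dict.items_counter]
  set L := input.toList with hL
  have hsorted :
      PySem.List.sorted ((PySem.Set.ofList L).map (fun k => (k, (L.count k : Int))))
        (fun x => PySem.Str.find input (String.singleton x.1)) false
      = (PySem.Set.ofList L).map (fun k => (k, (L.count k : Int))) := by
    apply PySem.List.sorted_eq_self_of_pairwise
    rw [List.pairwise_map]
    refine (pv_ofList_pairwise L).imp_of_mem ?_
    intro a b ha hb hab
    have ha' : a ∈ L := (PySem.Set.mem_ofList _ _).mp ha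
    have hb' : b ∈ L := (PySem.Set.mem_ofList _ _).mp hb
    have hfa : PySem.Str.find input (String.singleton a) = (L.idxOf a : Int) := by
      rw [PySem.Str.find_eq]
      simpa [hL] using pv_find_singleton L a ha'
    have hfb : PySem.Str.find input (String.singleton b) = (L.idxOf b : Int) := by
      rw [PySem.Str.find_eq]
      simpa [hL] using pv_find_singleton L b hb'
    simp only [hfa, hfb]
    exact le_of_lt (by exact_mod_cast hab)
  rw [hsorted, List.map_map]
  apply List.map_congr_left
  intro k hk
  have : PySem.Str.count input (String.singleton k) = L.count k := by
    rw [PySem.Str.count_eq]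
    simpa [hL] using pv_count_singleton L k
  simp only [Function.comp, this]
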